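-- pv_equiv track=rewrite | github.com/STAR-Laboratory/PRAC_TC_ISCA25 | TPRAC/champsim-ramulator2/champsim/scripts/sim_scripts/TPRAC/calc_rh_parameters.py | get_tprac_no_reset_parameters
-- ===== SOURCE A (Python) =====
-- def get_tprac_no_reset_parameters(tRH):
--     nrh_nbo_pairs = [
--         (128, 870),
--         (256, 1286),
--         (512, 2378),
--         (1024, 4510),
--         (2048, 8878),
--         (4096, 17458),
--     ]
--     for nrh, NBO in nrh_nbo_pairs:
--         if tRH <= nrh:
--             return NBO
--     return 32
-- ===== SOURCE B (Python) =====
-- import bisect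
--
-- _THRESHOLDS = (128, 256, 512, 1024, 2048, 4096)
-- _NBOS = (870, 1286, 2378, 4510, 8878, 17458)
--
-- def get_tprac_no_reset_parameters(tRH):
--     i = bisect.bisect_left(_THRESHOLDS, tRH)
--     return _NBOS[i] if i < len(_NBOS) else 32
-- ===== Notes on version B (the rewrite author's own statement) =====
-- stated objective: idiomatic
-- what changed: Replaced the linear scan over (threshold, NBO) pairs with a bisect_left binary search over a tuple of thresholds indexing a parallel tuple of NBO values.
import Mathlib
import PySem

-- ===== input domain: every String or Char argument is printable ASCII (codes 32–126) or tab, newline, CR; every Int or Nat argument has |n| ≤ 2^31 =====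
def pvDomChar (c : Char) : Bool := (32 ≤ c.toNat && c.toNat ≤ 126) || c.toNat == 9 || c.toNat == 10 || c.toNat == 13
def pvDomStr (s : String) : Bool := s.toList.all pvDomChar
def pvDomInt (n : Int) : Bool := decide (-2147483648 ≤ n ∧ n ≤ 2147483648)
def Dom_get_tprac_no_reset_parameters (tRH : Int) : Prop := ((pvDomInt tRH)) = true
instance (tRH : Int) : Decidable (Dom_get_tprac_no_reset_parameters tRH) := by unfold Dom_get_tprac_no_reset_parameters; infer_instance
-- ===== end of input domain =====

-- ===== PORT A =====
-- B replaces A's linear scan over (threshold, NBO) pairs with a bisect_left binary search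
-- over parallel threshold/NBO tuples (idiomatic; return value only, no side effects).
-- Loop 'for nrh, NBO in pairs: if tRH <= nrh: return NBO' as structural recursion on the list.
def pvScanPairs (tRH : Int) : List (Int × Int) → Int
  | [] => 32
  | (nrh, nbo) :: rest => if tRH ≤ nrh then nbo else pvScanPairs tRH rest

def get_tprac_no_reset_parameters (tRH : Int) : Int :=
  pvScanPairs tRH [(128, 870), (256, 1286), (512, 2378), (1024, 4510), (2048, 8878), (4096, 17458)]

-- ===== PORT B =====
-- bisect.bisect_left: while lo < hi: mid = (lo+hi)//2; if xs[mid] < x: lo = mid+1 else hi = mid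
def pvBisectLeftGo (xs : List Int) (x : Int) (lo hi : Nat) : Nat :=
  if _h : lo < hi then
    let mid := (lo + hi) / 2
    if xs.getD mid 0 < x then pvBisectLeftGo xs x (mid + 1) hi
    else pvBisectLeftGo xs x lo mid
  else lo
  termination_by hi - lo
  decreasing_by all_goals omega

def pvBisectLeft (xs : List Int) (x : Int) : Nat := pvBisectLeftGo xs x 0 xs.length

def pvThresholds : List Int := [128, 256, 512, 1024, 2048, 4096]
def pvNbos : List Int := [870, 1286, 2378, 4510, 8878, 17458]

def get_tprac_no_reset_parameters_alt (tRH : Int) : Int :=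
  let i := pvBisectLeft pvThresholds tRH
  if i < pvNbos.length then pvNbos.getD i 0 else 32

-- ===== PRECONDITION & SPEC =====
def Spec_get_tprac_no_reset_parameters (tRH : Int) (out : Int) : Prop := out = get_tprac_no_reset_parameters_alt tRH
instance (tRH : Int) (out : Int) : Decidable (Spec_get_tprac_no_reset_parameters tRH out) := by unfold Spec_get_tprac_no_reset_parameters; infer_instance

-- ===== CLAIM (what is proved, stated in full; the proofs are below) =====
def Claim_equal_get_tprac_no_reset_parameters : Prop := ∀ (tRH : Int), Dom_get_tprac_no_reset_parameters tRH → Spec_get_tprac_no_reset_parameters tRH (get_tprac_no_reset_parameters tRH)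

-- ===== LEMMAS AND PROOFS =====

-- ===== VERDICT (by name: the statement is the Claim_ definition above) =====
theorem get_tprac_no_reset_parameters_spec : Claim_equal_get_tprac_no_reset_parameters := by
  intro tRH _
  unfold Spec_get_tprac_no_reset_parameters get_tprac_no_reset_parameters
    get_tprac_no_reset_parameters_alt pvBisectLeft pvThresholds pvNbos
  simp [pvScanPairs, pvBisectLeftGo, List.getD]
  split_ifs <;> first | rfl | omega
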